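-- pv_equiv track=rewrite | github.com/HaroldGalvez09/Data-Science-Python | recetario.py | generar_lista_insumos
-- ===== SOURCE A (Python) =====
-- from collections import Counter, OrderedDict
-- from typing import Dict, List
--
-- Receta = Dict[str, List[str]]
--
-- def generar_lista_insumos(recetas: List[Receta]) -> List[str]:
--     """Genera una lista consolidada de insumos a partir de las recetas elegidas."""
--
--     contador = Counter()
--     for receta in recetas:
--         contador.update(receta["ingredientes"])
--
--     lista = []
--     for insumo, cantidad in sorted(contador.items()):
--         if cantidad == 1:
--             lista.append(f"- {insumo}")
--         else:
--             lista.append(f"- {insumo} (x{cantidad})")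
--     return lista
-- ===== SOURCE B (Python) =====
-- def generar_lista_insumos(recetas):
--     """Genera una lista consolidada de insumos a partir de las recetas elegidas."""
--     todos = []
--     for receta in recetas:
--         todos.extend(receta["ingredientes"])
--     todos.sort()
--     lista = []
--     i, n = 0, len(todos)
--     while i < n:
--         j = i + 1
--         while j < n and todos[j] == todos[i]:
--             j += 1
--         c = j - i
--         if c == 1:
--             lista.append(f"- {todos[i]}")
--         else:
--             lista.append(f"- {todos[i]} (x{c})")
--         i = j
--     return lista
-- ===== Notes on version B (the rewrite author's own statement) =====
-- stated objective: alternative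
-- what changed: B flattens all ingredient lists into one list, sorts it once, and emits one formatted line per maximal run of equal elements, instead of A's Counter hash-count followed by sorting the (key, count) items.
import Mathlib
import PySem

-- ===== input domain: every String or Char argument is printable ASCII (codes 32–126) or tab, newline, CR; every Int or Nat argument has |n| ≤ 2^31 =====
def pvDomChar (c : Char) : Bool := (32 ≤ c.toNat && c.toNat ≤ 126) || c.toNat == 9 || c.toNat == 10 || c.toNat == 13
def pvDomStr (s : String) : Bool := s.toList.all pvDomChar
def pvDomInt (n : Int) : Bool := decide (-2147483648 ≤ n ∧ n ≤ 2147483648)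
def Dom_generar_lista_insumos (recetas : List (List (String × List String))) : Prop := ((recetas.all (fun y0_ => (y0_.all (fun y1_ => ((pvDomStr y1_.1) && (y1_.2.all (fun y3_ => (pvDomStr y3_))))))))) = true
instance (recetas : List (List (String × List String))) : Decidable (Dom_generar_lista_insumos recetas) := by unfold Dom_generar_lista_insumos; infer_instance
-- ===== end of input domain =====

-- B replaces A's Counter-then-sort-the-items strategy by flatten, sort the whole
-- multiset once, and emit one formatted line per maximal run of equal elements
-- (alternative algorithm, same exact output).

-- ===== PORT A =====
-- shared f-string: both Pythons format a line as f"- {insumo}" / f"- {insumo} (x{cantidad})"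
def fmtItem (insumo : String) (cantidad : Int) : String :=
  if cantidad == 1 then "- " ++ insumo
  else "- " ++ insumo ++ " (x" ++ PySem.Int.toStr cantidad ++ ")"

def generar_lista_insumos (recetas : List (List (String × List String))) : List String :=
  let contador : PySem.Dict String Int := recetas.foldl
    (fun contador receta =>
      (((PySem.Dict.mk receta).get? "ingredientes").getD []).foldl
        (fun d x => d.insert x (d.getD x 0 + 1)) contador)
    PySem.Dict.empty
  (PySem.List.sorted2 contador.items (fun p => p.1) (fun p => p.2)).foldl
    (fun lista p => lista ++ [fmtItem p.1 p.2]) []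

-- ===== PORT B =====
-- the inner while loop of Source B: count the run of elements equal to the head, skip it
def groupRuns : List String → List String
  | [] => []
  | x :: rest =>
    fmtItem x (1 + (rest.takeWhile (fun y => y == x)).length)
      :: groupRuns (rest.dropWhile (fun y => y == x))
termination_by l => l.length
decreasing_by
  exact Nat.lt_succ_of_le (List.length_dropWhile_le _ _)

def generar_lista_insumos_alt (recetas : List (List (String × List String))) : List String :=
  let todos := recetas.foldl
    (fun todos receta => todos ++ (((PySem.Dict.mk receta).get? "ingredientes").getD [])) []
  groupRuns (PySem.List.sorted todos (fun x => x))

-- ===== PRECONDITION & SPEC =====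
-- Pre_ excludes exactly the inputs where some receta lacks the key "ingredientes",
-- on which Python A (and Python B alike) raises KeyError.
def Pre_generar_lista_insumos (recetas : List (List (String × List String))) : Prop :=
  ∀ receta ∈ recetas, ((PySem.Dict.mk receta).get? "ingredientes").isSome = true
instance (recetas : List (List (String × List String))) : Decidable (Pre_generar_lista_insumos recetas) := by unfold Pre_generar_lista_insumos; infer_instance

def pvWitness_generar_lista_insumos : (List (List (String × List String))) :=
  [[("ingredientes", ["harina", "sal"])], [("ingredientes", ["sal"]), ("nombre", ["pan"])]]

def Spec_generar_lista_insumos (recetas : List (List (String × List String))) (out : List String) : Prop := out = generar_lista_insumos_alt recetas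
instance (recetas : List (List (String × List String))) (out : List String) : Decidable (Spec_generar_lista_insumos recetas out) := by unfold Spec_generar_lista_insumos; infer_instance

-- ===== CLAIM (what is proved, stated in full; the proofs are below) =====
def Claim_equal_generar_lista_insumos : Prop := ∀ (recetas : List (List (String × List String))), Dom_generar_lista_insumos recetas → Pre_generar_lista_insumos recetas → Spec_generar_lista_insumos recetas (generar_lista_insumos recetas)

-- ===== LEMMAS AND PROOFS =====

-- the ingredient list a receta contributes
def pvIng (receta : List (String × List String)) : List String :=
  ((PySem.Dict.mk receta).get? "ingredientes").getD []

-- A's nested counting loop is the counting loop over the flattened list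
lemma foldl_count_flatMap (l : List (List (String × List String)))
    (d : PySem.Dict String Int) :
    l.foldl (fun contador receta =>
        (pvIng receta).foldl (fun d x => d.insert x (d.getD x 0 + 1)) contador) d
      = (l.flatMap pvIng).foldl (fun d x => d.insert x (d.getD x 0 + 1)) d := by
  induction l generalizing d with
  | nil => rfl
  | cons r rs ih => simp [List.flatMap_cons, List.foldl_append, ih]

lemma insertBy_congr {α : Type} (f g : α → α → Bool) (x : α) (acc : List α)
    (h : ∀ a ∈ acc, f x a = g x a) :
    PySem.List.insertBy f x acc = PySem.List.insertBy g x acc := by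
  induction acc with
  | nil => rfl
  | cons y ys ih =>
    rw [PySem.List.insertBy, PySem.List.insertBy, h y (List.mem_cons_self)]
    split
    · rfl
    · rw [ih (fun a ha => h a (List.mem_cons_of_mem _ ha))]

lemma foldl_insertBy_congr {α : Type} (f g : α → α → Bool) :
    ∀ (l acc : List α), (∀ a ∈ l, ∀ b, b ∈ acc ∨ b ∈ l → f a b = g a b) →
      l.foldl (fun acc x => PySem.List.insertBy f x acc) acc
        = l.foldl (fun acc x => PySem.List.insertBy g x acc) acc := by
  intro l
  induction l with
  | nil => intro acc _; rfl
  | cons x xs ih =>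
    intro acc h
    simp only [List.foldl_cons]
    rw [insertBy_congr f g x acc
      (fun a ha => h x (List.mem_cons_self) a (Or.inl ha))]
    apply ih
    intro a ha b hb
    apply h a (List.mem_cons_of_mem _ ha)
    rcases hb with hb | hb
    · rcases (PySem.List.mem_insertBy _ _ _ _).mp hb with he | hb'
      · exact Or.inr (he ▸ List.mem_cons_self)
      · exact Or.inl hb'
    · exact Or.inr (List.mem_cons_of_mem _ hb)

-- Python sorts the (key, count) pairs as tuples; with pairwise-distinct first
-- components this is the sort by first component
lemma sorted2_eq_sorted_fst (xs : List (String × Int))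
    (hnd : (xs.map Prod.fst).Nodup) :
    PySem.List.sorted2 xs (fun p => p.1) (fun p => p.2)
      = PySem.List.sorted xs (fun p => p.1) := by
  show xs.foldl (fun acc x => PySem.List.insertBy _ x acc) []
      = xs.foldl (fun acc x => PySem.List.insertBy _ x acc) []
  apply foldl_insertBy_congr
  intro a ha b hb
  have hb : b ∈ xs := hb.elim (fun h => absurd h (List.not_mem_nil)) id
  rcases lt_trichotomy a.1 b.1 with hlt | heq | hgt
  · simp [hlt, asymm hlt]
  · have hab : a = b := List.inj_on_of_nodup_map hnd ha hb heq
    subst hab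
    simp
  · simp [hgt, asymm hgt]

-- sorting the items of a counter lists the distinct keys in sorted order
lemma sorted_items_counter (all : List String) :
    PySem.List.sorted (PySem.Dict.counter all).items (fun p => p.1)
      = (PySem.List.sorted (PySem.Set.ofList all) (fun x => x)).map
          (fun k => (k, (all.count k : Int))) := by
  apply PySem.List.sorted_eq_of_perm_of_pairwise_lt
  · rw [PySem.Dict.items_counter]
    exact (PySem.List.sorted_perm _ _ _).map _
  · rw [List.pairwise_map]
    exact PySem.List.sorted_ofList_pairwise_lt all

-- B's grouping of a sorted list emits one line per distinct element, with its count
lemma groupRuns_sorted : ∀ (n : Nat) (all : List String), all.length ≤ n →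
    groupRuns (PySem.List.sorted all (fun x => x))
      = (PySem.List.sorted (PySem.Set.ofList all) (fun x => x)).map
          (fun k => fmtItem k (all.count k)) := by
  intro n
  induction n with
  | zero =>
    intro all h
    have hnil : all = [] := List.length_eq_zero_iff.mp (Nat.le_zero.mp h)
    subst hnil
    rw [show PySem.List.sorted ([] : List String) (fun x => x) = [] from rfl, groupRuns]
    rfl
  | succ m ih =>
    intro all hlen
    cases hs : PySem.List.sorted all (fun x => x) with
    | nil =>
      have hnil : all = [] := (PySem.List.sorted_eq_nil_iff _ _ _).mp hs
      subst hnil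
      rw [groupRuns]
      rfl
    | cons x t =>
      have hperm : (x :: t).Perm all := hs ▸ PySem.List.sorted_perm all _ false
      have hpw : (x :: t).Pairwise (fun a b => a ≤ b) := hs ▸ PySem.List.sorted_pairwise all _
      have hmin : ∀ y ∈ all, x ≤ y := PySem.List.key_head_sorted_le all _ hs
      have hxall : x ∈ all := hperm.mem_iff.mp List.mem_cons_self
      have hpwt : t.Pairwise (fun a b => a ≤ b) := (List.pairwise_cons.mp hpw).2
      have hxt : ∀ y ∈ t, x ≤ y := (List.pairwise_cons.mp hpw).1
      have htr : t.takeWhile (fun y => y == x) ++ t.dropWhile (fun y => y == x) = t :=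
        List.takeWhile_append_dropWhile
      have hrun : ∀ y ∈ t.takeWhile (fun y => y == x), y = x := fun y hy => by
        simpa using List.mem_takeWhile_imp hy
      have hpwrest : (t.dropWhile (fun y => y == x)).Pairwise (fun a b => a ≤ b) :=
        List.Pairwise.sublist (List.dropWhile_sublist _) hpwt
      -- everything remaining after the run is strictly greater than x
      have hrest : ∀ y ∈ t.dropWhile (fun y => y == x), x < y := by
        cases hd : t.dropWhile (fun y => y == x) with
        | nil => intro y hy; simp at hy
        | cons hh r =>
          have hne : (hh == x) = false := by
            have := List.head?_dropWhile_not (fun y => y == x) t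
            rw [hd] at this; simpa using this
          have hmem : hh ∈ t := (List.dropWhile_sublist _).subset (hd ▸ List.mem_cons_self)
          have hxh : x < hh :=
            lt_of_le_of_ne (hxt hh hmem) (fun he => by simp [← he] at hne)
          intro y hy
          rcases List.mem_cons.mp hy with rfl | hy'
          · exact hxh
          · have hpc := (List.pairwise_cons.mp (hd ▸ hpwrest)).1
            exact lt_of_lt_of_le hxh (hpc y hy')
      -- count of x in all is 1 + run length
      have hcount : all.count x = (t.takeWhile (fun y => y == x)).length + 1 := by
        rw [← hperm.count_eq x, List.count_cons_self]
        have h1 : (t.takeWhile (fun y => y == x)).count x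
            = (t.takeWhile (fun y => y == x)).length :=
          List.count_eq_length.mpr (fun b hb => (hrun b hb).symm)
        have h2 : (t.dropWhile (fun y => y == x)).count x = 0 :=
          List.count_eq_zero.mpr (fun hx => lt_irrefl x (hrest x hx))
        have h3 : List.count x t = (t.takeWhile (fun y => y == x)).length := by
          conv_lhs => rw [← htr]
          rw [List.count_append, h1, h2]
          omega
        rw [h3]
      -- the remaining multiset
      have hrest_eq : (x :: t).filter (fun y => !(y == x)) = t.dropWhile (fun y => y == x) := by
        rw [List.filter_cons, ← htr, List.filter_append]
        have h1 : (t.takeWhile (fun y => y == x)).filter (fun y => !(y == x)) = [] :=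
          List.filter_eq_nil_iff.mpr (fun y hy => by simp [hrun y hy])
        have h2 : (t.dropWhile (fun y => y == x)).filter (fun y => !(y == x))
            = t.dropWhile (fun y => y == x) :=
          List.filter_eq_self.mpr (fun y hy => by simp [ne_of_gt (hrest y hy)])
        simp [h1, h2]
      have hpermrest : (t.dropWhile (fun y => y == x)).Perm (all.filter (fun y => !(y == x))) :=
        hrest_eq ▸ hperm.filter _
      have hsorted_rest : PySem.List.sorted (all.filter (fun y => !(y == x))) (fun x => x)
          = t.dropWhile (fun y => y == x) :=
        PySem.List.sorted_id_eq_of_perm_of_pairwise _ _ hpermrest hpwrest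
      have hlen' : (all.filter (fun y => !(y == x))).length ≤ m := by
        have : (all.filter (fun y => !(y == x))).length < all.length :=
          List.length_filter_lt_length_iff_exists.mpr ⟨x, hxall, by simp⟩
        omega
      -- the sorted distinct keys decompose as x followed by those of the rest
      have hSK : PySem.List.sorted (PySem.Set.ofList all) (fun x => x)
          = x :: PySem.List.sorted (PySem.Set.ofList (all.filter (fun y => !(y == x)))) (fun x => x) := by
        apply PySem.List.sorted_eq_of_perm_of_pairwise_lt
        · rw [List.perm_ext_iff_of_nodup ?_ (PySem.Set.nodup_ofList all)]
          · intro a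
            simp only [List.mem_cons, PySem.List.mem_sorted, PySem.Set.mem_ofList,
              List.mem_filter, Bool.not_eq_eq_eq_not, Bool.not_true, beq_eq_false_iff_ne,
              ne_eq]
            constructor
            · rintro (rfl | ⟨ha, _⟩)
              · exact hxall
              · exact ha
            · intro ha
              by_cases hax : a = x
              · exact Or.inl hax
              · exact Or.inr ⟨ha, hax⟩
          · refine List.nodup_cons.mpr ⟨?_, ?_⟩
            · intro hx
              have := (PySem.Set.mem_ofList _ _).mp ((PySem.List.mem_sorted _ _ _ _).mp hx)
              simp at this
            · exact (PySem.List.sorted_perm (PySem.Set.ofList (all.filter (fun y => !(y == x))))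
                (fun x => x) false).symm.nodup (PySem.Set.nodup_ofList _)
        · rw [List.pairwise_cons]
          refine ⟨?_, PySem.List.sorted_ofList_pairwise_lt _⟩
          intro y hy
          have hy' := (PySem.Set.mem_ofList _ _).mp ((PySem.List.mem_sorted _ _ _ _).mp hy)
          rw [List.mem_filter] at hy'
          have hyx : y ≠ x := by simpa using hy'.2
          exact lt_of_le_of_ne (hmin y hy'.1) (Ne.symm hyx)
      -- put the pieces together
      rw [groupRuns, hSK, List.map_cons, ← hsorted_rest, ih _ hlen']
      congr 1
      · have hc : ((all.count x : Int)) = 1 + ((t.takeWhile (fun y => y == x)).length : Int) := by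
          rw [hcount]; push_cast; ring
        rw [hc]
      · apply List.map_congr_left
        intro k hk
        have hk' := (PySem.Set.mem_ofList _ _).mp ((PySem.List.mem_sorted _ _ _ _).mp hk)
        rw [List.mem_filter] at hk'
        rw [List.count_filter (p := fun y => !(y == x)) (a := k) (l := all) hk'.2]

-- A's output in canonical form
lemma A_eq (recetas : List (List (String × List String))) :
    generar_lista_insumos recetas
      = (PySem.List.sorted (PySem.Set.ofList (recetas.flatMap pvIng)) (fun x => x)).map
          (fun k => fmtItem k ((recetas.flatMap pvIng).count k)) := by
  unfold generar_lista_insumos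
  rw [show (fun (contador : PySem.Dict String Int) (receta : List (String × List String)) =>
        (((PySem.Dict.mk receta).get? "ingredientes").getD []).foldl
          (fun d x => d.insert x (d.getD x 0 + 1)) contador)
      = (fun contador receta => (pvIng receta).foldl
          (fun d x => d.insert x (d.getD x 0 + 1)) contador) from rfl]
  rw [foldl_count_flatMap, PySem.Dict.foldl_insert_getD_add_one_eq_counter]
  set all := recetas.flatMap pvIng with hall
  show List.foldl (fun lista p => lista ++ [fmtItem p.1 p.2]) []
      (PySem.List.sorted2 (PySem.Dict.counter all).items (fun p => p.1) (fun p => p.2))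
    = _
  rw [sorted2_eq_sorted_fst _ (by
      rw [PySem.Dict.items_counter]
      simp only [List.map_map]
      rw [show (Prod.fst ∘ fun k : String => (k, (List.count k all : Int))) = id from rfl,
        List.map_id]
      exact PySem.Set.nodup_ofList all)]
  rw [sorted_items_counter, PySem.List.foldl_append_singleton_eq_map,
    List.map_map, List.nil_append]
  rfl

-- B's output in canonical form
lemma B_eq (recetas : List (List (String × List String))) :
    generar_lista_insumos_alt recetas
      = (PySem.List.sorted (PySem.Set.ofList (recetas.flatMap pvIng)) (fun x => x)).map
          (fun k => fmtItem k ((recetas.flatMap pvIng).count k)) := by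
  unfold generar_lista_insumos_alt
  rw [show (fun (todos : List String) (receta : List (String × List String)) =>
        todos ++ (((PySem.Dict.mk receta).get? "ingredientes").getD []))
      = (fun todos receta => todos ++ pvIng receta) from rfl]
  rw [PySem.List.foldl_append_eq_flatMap, List.nil_append]
  exact groupRuns_sorted (recetas.flatMap pvIng).length _ le_rfl

-- ===== VERDICT (by name: the statement is the Claim_ definition above) =====
theorem generar_lista_insumos_spec : Claim_equal_generar_lista_insumos := by
  intro recetas _ _
  unfold Spec_generar_lista_insumos
  rw [A_eq, B_eq]
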